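-- pv_equiv track=rewrite | github.com/kstrauser/wordle_cheat | wordle_cheat/wordle.py | goodwords
-- ===== SOURCE A (Python) =====
-- def goodwords(words: list[str]) -> list[str]:
--     """Return a sorted list of all unique, valid Wordle answers from the list."""
--
--     return sorted(
--         {
--             word.lower()
--             for word in words
--             if len(word) == 5 and word.isalpha() and word.isascii()
--         }
--     )
-- ===== SOURCE B (Python) =====
-- def goodwords(words: list[str]) -> list[str]:
--     """Return a sorted list of all unique, valid Wordle answers from the list."""
--     cands = []
--     for word in words:
--         if word.isascii() and word.isalpha() and len(word) == 5:
--             cands.append(word.lower())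
--     cands.sort()
--     out = []
--     prev = None
--     for word in cands:
--         if word != prev:
--             out.append(word)
--             prev = word
--     return out
-- ===== Notes on version B (the rewrite author's own statement) =====
-- stated objective: alternative
-- what changed: Replaces A's hash-set dedup followed by sorting with sorting the raw lowered candidates first and then one linear pass that keeps an element only when it differs from the previous one (no set anywhere).
import Mathlib
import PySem

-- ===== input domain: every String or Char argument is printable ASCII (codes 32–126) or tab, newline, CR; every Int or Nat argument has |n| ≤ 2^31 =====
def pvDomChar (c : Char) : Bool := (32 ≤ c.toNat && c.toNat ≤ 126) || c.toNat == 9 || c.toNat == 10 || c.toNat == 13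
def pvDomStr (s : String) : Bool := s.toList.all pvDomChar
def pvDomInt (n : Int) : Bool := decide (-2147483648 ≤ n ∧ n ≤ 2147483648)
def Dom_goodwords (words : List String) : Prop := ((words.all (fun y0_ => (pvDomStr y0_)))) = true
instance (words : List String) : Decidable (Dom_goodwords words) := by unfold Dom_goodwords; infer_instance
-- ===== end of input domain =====

-- B trades A's hash-set dedup for sort-first then one adjacent-duplicate-dropping pass (alternative decomposition, same cost).

-- str.isascii has no PySem primitive; ported by hand as 'every code point < 128', exact for Python's str.isascii
def pvIsascii (w : String) : Bool := w.toList.all (fun c => c.toNat < 128)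

-- A's filter: len(word) == 5 and word.isalpha() and word.isascii()
def pvWordOk (w : String) : Bool :=
  PySem.Str.len w == 5 && PySem.Str.strIsalpha w && pvIsascii w

-- B's filter (B tests in the cheap-first order): word.isascii() and word.isalpha() and len(word) == 5
def pvWordOkB (w : String) : Bool :=
  pvIsascii w && PySem.Str.strIsalpha w && PySem.Str.len w == 5

-- ===== PORT A =====
def goodwords (words : List String) : List String :=
  PySem.List.sorted
    (PySem.Set.ofList ((words.filter pvWordOk).map (fun w => PySem.Str.lower w)))
    (fun x => x) false

-- ===== PORT B =====
def goodwords_alt (words : List String) : List String :=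
  let raw := words.foldl
    (fun acc word => if pvWordOkB word then acc ++ [PySem.Str.lower word] else acc) []
  let cands := PySem.List.sorted raw (fun x => x) false
  (cands.foldl
    (fun st word => if st.2 = some word then st else (st.1 ++ [word], some word))
    (([] : List String), (none : Option String))).1

-- ===== PRECONDITION & SPEC =====
def Spec_goodwords (words : List String) (out : List String) : Prop := out = goodwords_alt words
instance (words : List String) (out : List String) : Decidable (Spec_goodwords words out) := by unfold Spec_goodwords; infer_instance

-- ===== CLAIM (what is proved, stated in full; the proofs are below) =====
def Claim_equal_goodwords : Prop := ∀ (words : List String), Dom_goodwords words → Spec_goodwords words (goodwords words)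

-- ===== LEMMAS AND PROOFS =====

theorem pvWordOkB_eq (w : String) : pvWordOkB w = pvWordOk w := by
  simp only [pvWordOkB, pvWordOk]
  cases pvIsascii w <;> cases PySem.Str.strIsalpha w <;> cases PySem.Str.len w == 5 <;> rfl

-- B's candidate-collecting loop builds exactly A's filtered-and-lowered list
theorem pvFoldl_collect (ws : List String) (acc : List String) :
    ws.foldl (fun acc word => if pvWordOkB word then acc ++ [PySem.Str.lower word] else acc) acc
      = acc ++ (ws.filter pvWordOk).map (fun w => PySem.Str.lower w) := by
  induction ws generalizing acc with
  | nil => simp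
  | cons w t ih =>
    simp only [List.foldl_cons, List.filter_cons, pvWordOkB_eq w]
    by_cases h : pvWordOk w = true
    · rw [if_pos h, if_pos h, ih]; simp
    · rw [if_neg h, if_neg h, ih]

-- recursive description of B's previous-element loop
def pvAdj (p : Option String) : List String → List String
  | [] => []
  | y :: t => if p = some y then pvAdj p t else y :: pvAdj (some y) t

theorem pvFoldl_adj (l : List String) (out : List String) (p : Option String) :
    (l.foldl (fun st word => if st.2 = some word then st else (st.1 ++ [word], some word))
      (out, p)).1 = out ++ pvAdj p l := by
  induction l generalizing out p with
  | nil => simp [pvAdj]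
  | cons y t ih =>
    simp only [List.foldl_cons, pvAdj]
    by_cases h : p = some y
    · simp [h, ih]
    · simp [h, ih]

theorem pvAdj_some (s : List String) (x : String)
    (hp : s.Pairwise (· ≤ ·)) (hx : ∀ y ∈ s, x ≤ y) :
    (pvAdj (some x) s).Pairwise (· < ·) ∧ (∀ y, y ∈ pvAdj (some x) s ↔ y ∈ s ∧ y ≠ x) := by
  induction s generalizing x with
  | nil => simp [pvAdj]
  | cons y t ih =>
    rw [List.pairwise_cons] at hp
    by_cases h : x = y
    · subst h
      have := ih x hp.2 hp.1
      simp only [pvAdj, if_true]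
      refine ⟨this.1, fun z => ?_⟩
      rw [(this.2 z)]
      constructor
      · rintro ⟨hz, hne⟩; exact ⟨List.mem_cons_of_mem _ hz, hne⟩
      · rintro ⟨hz, hne⟩
        rcases List.mem_cons.mp hz with rfl | hz
        · exact absurd rfl hne
        · exact ⟨hz, hne⟩
    · have hxy : x < y := lt_of_le_of_ne (hx y (List.mem_cons_self)) h
      have := ih y hp.2 hp.1
      have hne : (some x : Option String) ≠ some y := by simp [h]
      simp only [pvAdj, if_neg hne]
      constructor
      · rw [List.pairwise_cons]
        refine ⟨fun z hz => ?_, this.1⟩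
        have := (this.2 z).mp hz
        exact lt_of_le_of_ne (hp.1 z this.1) (Ne.symm this.2)
      · intro z
        rw [List.mem_cons, this.2 z, List.mem_cons]
        constructor
        · rintro (rfl | ⟨hz, hne'⟩)
          · exact ⟨Or.inl rfl, ne_of_gt hxy⟩
          · exact ⟨Or.inr hz, ne_of_gt (lt_of_lt_of_le hxy (hp.1 z hz))⟩
        · rintro ⟨rfl | hz, hne'⟩
          · exact Or.inl rfl
          · by_cases hzy : z = y
            · exact Or.inl hzy
            · exact Or.inr ⟨hz, hzy⟩

theorem pvAdj_none (s : List String) (hp : s.Pairwise (· ≤ ·)) :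
    (pvAdj none s).Pairwise (· < ·) ∧ (∀ y, y ∈ pvAdj none s ↔ y ∈ s) := by
  cases s with
  | nil => simp [pvAdj]
  | cons y t =>
    rw [List.pairwise_cons] at hp
    have := pvAdj_some t y hp.2 hp.1
    simp only [pvAdj, reduceCtorEq, if_false]
    constructor
    · rw [List.pairwise_cons]
      refine ⟨fun z hz => ?_, this.1⟩
      have := (this.2 z).mp hz
      exact lt_of_le_of_ne (hp.1 z this.1) (Ne.symm this.2)
    · intro z
      rw [List.mem_cons, this.2 z, List.mem_cons]
      constructor
      · rintro (rfl | ⟨hz, _⟩)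
        · exact Or.inl rfl
        · exact Or.inr hz
      · rintro (rfl | hz)
        · exact Or.inl rfl
        · by_cases hzy : z = y
          · exact Or.inl hzy
          · exact Or.inr ⟨hz, hzy⟩

theorem pvMain (ys : List String) :
    PySem.List.sorted (PySem.Set.ofList ys) (fun x => x) false
      = pvAdj none (PySem.List.sorted ys (fun x => x) false) := by
  have hp : (PySem.List.sorted ys (fun x => x) false).Pairwise (· ≤ ·) :=
    PySem.List.sorted_pairwise ys (fun x => x)
  obtain ⟨hlt, hmem⟩ := pvAdj_none _ hp
  apply PySem.List.sorted_eq_of_perm_of_pairwise_lt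
  · rw [List.perm_ext_iff_of_nodup (hlt.imp ne_of_lt) (PySem.Set.nodup_ofList _)]
    intro a
    rw [hmem a, PySem.List.mem_sorted, PySem.Set.mem_ofList]
  · exact hlt

-- ===== VERDICT (by name: the statement is the Claim_ definition above) =====
theorem goodwords_spec : Claim_equal_goodwords := by
  intro words _
  show goodwords words = goodwords_alt words
  unfold goodwords goodwords_alt
  rw [pvFoldl_collect, List.nil_append, pvFoldl_adj, List.nil_append, pvMain]
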